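-- pv_equiv track=rewrite | github.com/Samuel-BlankAmber/compression-resistant-steganography | decode.py | determine_colour_size
-- ===== SOURCE A (Python) =====
-- from collections import Counter
--
-- def get_encoded_data(pixel):
--     return "".join("1" if colour > 128 else "0" for colour in pixel)
--
-- def determine_colour_size(width, _height, pixel_data):
--     first_row = pixel_data[:width]
--     num_sames = []
--     num_same = 1
--     for pixel, prev_pixel in zip(first_row[1:], first_row):
--         if get_encoded_data(pixel) == get_encoded_data(prev_pixel):
--             num_same += 1
--             continue
--         num_sames.append(num_same)
--         num_same = 1
--     return Counter(num_sames).most_common(1)[0][0]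
-- ===== SOURCE B (Python) =====
-- from collections import Counter
--
-- def get_encoded_data(pixel):
--     return "".join("1" if colour > 128 else "0" for colour in pixel)
--
-- def determine_colour_size(width, _height, pixel_data):
--     encoded = [get_encoded_data(p) for p in pixel_data[:width]]
--     n = len(encoded)
--     boundaries = [i for i in range(1, n) if encoded[i] != encoded[i - 1]]
--     runs = [b - prev for b, prev in zip(boundaries, [0] + boundaries)]
--     return Counter(runs).most_common(1)[0][0]
-- ===== Notes on version B (the rewrite author's own statement) =====
-- stated objective: alternative
-- what changed: B replaces A's accumulate-on-change loop (run counter reset at each change) by precomputing the encoded row once, collecting the boundary indices where the encoding changes with an index scan, and taking successive differences of [0]+boundaries as the run lengths (the final run is dropped by construction, as zip truncates).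
import Mathlib
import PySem

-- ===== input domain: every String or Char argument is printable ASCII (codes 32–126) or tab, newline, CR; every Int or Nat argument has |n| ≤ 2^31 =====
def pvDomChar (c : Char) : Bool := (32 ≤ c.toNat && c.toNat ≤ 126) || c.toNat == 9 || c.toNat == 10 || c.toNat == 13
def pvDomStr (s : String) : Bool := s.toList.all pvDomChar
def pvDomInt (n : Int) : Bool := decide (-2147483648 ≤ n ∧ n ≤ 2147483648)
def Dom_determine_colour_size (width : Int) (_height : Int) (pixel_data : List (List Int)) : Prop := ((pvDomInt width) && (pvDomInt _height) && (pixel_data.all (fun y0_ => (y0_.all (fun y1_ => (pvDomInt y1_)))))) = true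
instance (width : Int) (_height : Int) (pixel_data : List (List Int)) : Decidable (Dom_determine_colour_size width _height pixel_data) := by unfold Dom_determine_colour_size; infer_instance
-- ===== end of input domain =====

-- B rebuilds the run-length list from a boundary-index table (scan for change positions,
-- then successive differences) instead of A's accumulate-on-change loop; objective: alternative.


-- ===== PORT A =====
-- shared module helper get_encoded_data(pixel): "".join("1" if colour > 128 else "0" ...)
def get_encoded_data (pixel : List Int) : String :=
  PySem.Str.join "" (pixel.map (fun colour => if colour > 128 then "1" else "0"))

-- A: running counter reset at each encoding change over zip(first_row[1:], first_row);
-- Counter(num_sames).most_common(1)[0][0] ported as head of the stable descending sort by count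
-- (exactly most_common(1)); returns 0 where Python raises IndexError (excluded by Pre_).
def determine_colour_size (width : Int) (_height : Int) (pixel_data : List (List Int)) : Int :=
  let first_row := PySem.List.slice pixel_data none (some width)
  let st := ((PySem.List.slice first_row (some 1) none).zip first_row).foldl
    (fun (st : List Int × Int) pq =>
      if get_encoded_data pq.1 = get_encoded_data pq.2 then (st.1, st.2 + 1)
      else (st.1 ++ [st.2], 1)) ([], 1)
  (((PySem.List.sorted (PySem.Dict.counter st.1).items (fun kv => kv.2) true).head?).map Prod.fst).getD 0

-- ===== PORT B =====
-- B: encode the first row once, collect boundary indices i with encoded[i] != encoded[i-1],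
-- run lengths = successive differences of [0]+boundaries (zip truncates, dropping the last run);
-- same Counter(runs).most_common(1)[0][0]; returns 0 where Python raises IndexError (excluded by Pre_).
def determine_colour_size_alt (width : Int) (_height : Int) (pixel_data : List (List Int)) : Int :=
  let encoded := (PySem.List.slice pixel_data none (some width)).map get_encoded_data
  let boundaries := (PySem.List.pyRange 1 (encoded.length : Int) 1).filter
      (fun i => PySem.List.pyGetD encoded i "" != PySem.List.pyGetD encoded (i - 1) "")
  let runs := (boundaries.zip ((0 : Int) :: boundaries)).map (fun bp => bp.1 - bp.2)
  (((PySem.List.sorted (PySem.Dict.counter runs).items (fun kv => kv.2) true).head?).map Prod.fst).getD 0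

-- ===== PRECONDITION & SPEC =====
-- Pre_ excludes exactly the inputs whose first row has no adjacent encoding change
-- (row of length ≤ 1 or all-equal encodings): there Python A raises IndexError on most_common(1)[0].
def Pre_determine_colour_size (width : Int) (_height : Int) (pixel_data : List (List Int)) : Prop :=
  let fr := PySem.List.slice pixel_data none (some width)
  ∃ p ∈ (fr.drop 1).zip fr, get_encoded_data p.1 ≠ get_encoded_data p.2
instance (width : Int) (_height : Int) (pixel_data : List (List Int)) : Decidable (Pre_determine_colour_size width _height pixel_data) := by unfold Pre_determine_colour_size; infer_instance

def pvWitness_determine_colour_size : Int × Int × List (List Int) := (2, 0, [[0], [200]])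

def Spec_determine_colour_size (width : Int) (_height : Int) (pixel_data : List (List Int)) (out : Int) : Prop := out = determine_colour_size_alt width _height pixel_data
instance (width : Int) (_height : Int) (pixel_data : List (List Int)) (out : Int) : Decidable (Spec_determine_colour_size width _height pixel_data out) := by unfold Spec_determine_colour_size; infer_instance

-- ===== CLAIM (what is proved, stated in full; the proofs are below) =====
def Claim_equal_determine_colour_size : Prop := ∀ (width : Int) (_height : Int) (pixel_data : List (List Int)), Dom_determine_colour_size width _height pixel_data → Pre_determine_colour_size width _height pixel_data → Spec_determine_colour_size width _height pixel_data (determine_colour_size width _height pixel_data)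

-- ===== LEMMAS AND PROOFS =====

-- run lengths (dropping the final run) from the list of change flags, current run length c
def pvG (d : List Bool) (c : Int) : List Int :=
  match d with
  | [] => []
  | b :: t => if b then c :: pvG t 1 else pvG t (c + 1)

-- successive differences with previous value p
def pvDiffs (p : Int) (bs : List Int) : List Int :=
  match bs with
  | [] => []
  | b :: bs => (b - p) :: pvDiffs b bs

-- A's loop, characterised: accumulated runs = pvG of the change-flag list
theorem pvA_foldl (ps : List (List Int × List Int)) (acc : List Int) (c : Int) :
    (ps.foldl (fun (st : List Int × Int) pq =>
      if get_encoded_data pq.1 = get_encoded_data pq.2 then (st.1, st.2 + 1)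
      else (st.1 ++ [st.2], 1)) (acc, c)).1
    = acc ++ pvG (ps.map (fun p => get_encoded_data p.1 != get_encoded_data p.2)) c := by
  induction ps generalizing acc c with
  | nil => simp [pvG]
  | cons p t ih =>
    by_cases h : get_encoded_data p.1 = get_encoded_data p.2
    · simp [h, pvG, ih]
    · simp [h, pvG, ih]

-- B's diff pass: zip with the shifted list is pvDiffs
theorem pvZip_diffs (bs : List Int) (p : Int) :
    (bs.zip (p :: bs)).map (fun bp => bp.1 - bp.2) = pvDiffs p bs := by
  induction bs generalizing p with
  | nil => rfl
  | cons b t ih => simp [pvDiffs, ih]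

-- core: diffs of the (shifted) true-positions of d recover pvG d c
theorem pvMain (d : List Bool) (p c : Int) :
    pvDiffs p (((List.range d.length).filter (fun k => d.getD k false)).map
      (fun k : Nat => (k : Int) + p + c)) = pvG d c := by
  induction d generalizing p c with
  | nil => rfl
  | cons b t ih =>
    rw [List.length_cons, List.range_succ_eq_map, List.filter_cons, List.filter_map]
    have hcomp : ((fun k => (b :: t : List Bool).getD k false) ∘ Nat.succ)
        = (fun k => t.getD k false) := by
      funext k; simp
    rw [hcomp]
    cases b with
    | true =>
      have hm : ((((List.range t.length).filter (fun k => t.getD k false)).map Nat.succ).map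
            (fun k : Nat => (k : Int) + p + c))
          = ((List.range t.length).filter (fun k => t.getD k false)).map
            (fun k : Nat => (k : Int) + (p + c) + 1) := by
        rw [List.map_map]
        refine List.map_congr_left ?_
        intro k _
        simp only [Function.comp, Nat.succ_eq_add_one]
        push_cast
        ring
      simp only [List.getD_cons_zero, if_true, List.map_cons, hm, pvDiffs, Nat.cast_zero,
        zero_add]
      rw [ih (p + c) 1]
      have h0 : p + c - p = c := by ring
      rw [h0]
      simp [pvG]
    | false =>
      have hm : ((((List.range t.length).filter (fun k => t.getD k false)).map Nat.succ).map
            (fun k : Nat => (k : Int) + p + c))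
          = ((List.range t.length).filter (fun k => t.getD k false)).map
            (fun k : Nat => (k : Int) + p + (c + 1)) := by
        rw [List.map_map]
        refine List.map_congr_left ?_
        intro k _
        simp only [Function.comp, Nat.succ_eq_add_one]
        push_cast
        ring
      simp only [List.getD_cons_zero, Bool.false_eq_true, if_false, hm]
      rw [ih p (c + 1)]
      simp [pvG]

-- B's boundary scan over the encoded row, as the nat-index filter over the change flags
theorem pvB_filter (e : List String) :
    (PySem.List.pyRange 1 (e.length : Int) 1).filter
      (fun i => PySem.List.pyGetD e i "" != PySem.List.pyGetD e (i - 1) "")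
    = ((List.range (((e.drop 1).zip e).map (fun q => q.1 != q.2)).length).filter
        (fun k => (((e.drop 1).zip e).map (fun q => q.1 != q.2)).getD k false)).map
        (fun k : Nat => (1 : Int) + (k : Int)) := by
  have hlen : (((e.drop 1).zip e).map (fun q => q.1 != q.2)).length = e.length - 1 := by
    simp [List.length_zip]
  have hnat : ((e.length : Int) - 1).toNat = e.length - 1 := by omega
  have hrange : PySem.List.pyRange 1 (e.length : Int) 1
      = (List.range (e.length - 1)).map (fun k : Nat => (1 : Int) + (k : Int)) := by
    rw [PySem.List.pyRange_one, hnat]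
  rw [hrange, List.filter_map, hlen]
  congr 1
  apply List.filter_congr
  intro k hk
  have hk' : k < e.length - 1 := List.mem_range.mp hk
  have hk1 : k + 1 < e.length := by omega
  have hkk : k < e.length := by omega
  have hkd : k < (((e.drop 1).zip e).map (fun q : String × String => q.1 != q.2)).length := by
    rw [hlen]; omega
  have h2 : (1 : Int) + (k : Int) - 1 = ((k : Nat) : Int) := by ring
  have h1 : (1 : Int) + (k : Int) = ((k + 1 : Nat) : Int) := by push_cast; ring
  simp only [Function.comp_apply]
  rw [h2, h1, PySem.List.pyGetD_natCast, PySem.List.pyGetD_natCast,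
    e.getD_eq_getElem "" hk1, e.getD_eq_getElem "" hkk,
    List.getD_eq_getElem _ false hkd]
  simp

-- the two run-length lists coincide
theorem pvRuns_eq (fr : List (List Int)) :
    (((fr.drop 1).zip fr).foldl (fun (st : List Int × Int) pq =>
      if get_encoded_data pq.1 = get_encoded_data pq.2 then (st.1, st.2 + 1)
      else (st.1 ++ [st.2], 1)) ([], 1)).1
    = (((PySem.List.pyRange 1 ((fr.map get_encoded_data).length : Int) 1).filter
          (fun i => PySem.List.pyGetD (fr.map get_encoded_data) i ""
            != PySem.List.pyGetD (fr.map get_encoded_data) (i - 1) "")).zip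
        ((0 : Int) :: (PySem.List.pyRange 1 ((fr.map get_encoded_data).length : Int) 1).filter
          (fun i => PySem.List.pyGetD (fr.map get_encoded_data) i ""
            != PySem.List.pyGetD (fr.map get_encoded_data) (i - 1) ""))).map
        (fun bp => bp.1 - bp.2) := by
  set e := fr.map get_encoded_data with he
  rw [pvZip_diffs, pvB_filter, pvA_foldl]
  have hd : ((fr.drop 1).zip fr).map (fun p => get_encoded_data p.1 != get_encoded_data p.2)
      = ((e.drop 1).zip e).map (fun q => q.1 != q.2) := by
    rw [he, ← List.map_drop, List.zip_map, List.map_map]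
    rfl
  rw [List.nil_append, hd]
  have hf : (fun k : Nat => (1 : Int) + (k : Int)) = (fun k : Nat => (k : Int) + 0 + 1) := by
    funext k; ring
  rw [hf, pvMain]

-- ===== VERDICT (by name: the statement is the Claim_ definition above) =====
theorem determine_colour_size_spec : Claim_equal_determine_colour_size := by
  intro width _height pixel_data _dom _pre
  unfold Spec_determine_colour_size determine_colour_size determine_colour_size_alt
  simp only [PySem.List.slice_from_one, ← List.drop_one]
  rw [pvRuns_eq]
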